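-- pv_equiv track=rewrite | github.com/cczhong11/Leetcode-contest-code-downloader | Questiondir/656.coin-path/656.coin-path_112668227.py | cheapestJump
-- ===== SOURCE A (Python) =====
-- def cheapestJump(A, B):
--     """
--     :type A: List[int]
--     :type B: int
--     :rtype: List[int]
--     """
--     if len(A) == 1:
--         return [1]
--     A = A[::-1]
--     # coin, from
--     dp = [(None, None) for _ in range(len(A))]
--     dp[0] = (A[0], None)
--     for i, coin in enumerate(A):
--         if coin == -1 or (dp[i][1] is None and i != 0):
--             continue
--         for l in range(1, B + 1):
--             if i + l >= len(A) or A[i+l] == -1: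
--                 continue
--             if (dp[i+l][0] is None or
--                 dp[i][0]+A[i+l] < dp[i+l][0] or
--                 (dp[i][0]+A[i+l] == dp[i+l][0] and i > dp[i+l][1])):
--                 dp[i+l] = (dp[i][0] + A[i+l], i)
--     if dp[-1][1] is None:
--         return []
--     answer = []
--     i = len(A)-1
--     while True:
--         answer.append(len(A)-i)
--         if dp[i][1] is None:
--             break
--         i = dp[i][1]
--     return answer
-- ===== SOURCE B (Python) =====
-- def cheapestJump(A, B):
--     n = len(A)
--     if n == 1:
--         return [1]
--     cost = [None] * n
--     nxt = [None] * n
--     if A[n-1] != -1: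
--         cost[n-1] = A[n-1]
--     for i in range(n-2, -1, -1):
--         if A[i] == -1:
--             continue
--         best = None
--         bj = None
--         for l in range(1, min(B, n-1-i) + 1):
--             j = i + l
--             if cost[j] is None:
--                 continue
--             c = A[i] + cost[j]
--             if best is None or c < best:
--                 best = c
--                 bj = j
--         cost[i] = best
--         nxt[i] = bj
--     if cost[0] is None:
--         return []
--     res = []
--     i = 0
--     while i is not None:
--         res.append(i + 1)
--         i = nxt[i]
--     return res
-- ===== Notes on version B (the rewrite author's own statement) =====
-- stated objective: alternative
-- what changed: A reverses the array and runs a forward push-style DP with back-pointers plus a reversed-index reconstruction; B keeps the original array, computes cost/next tables by a backward pull-style DP (inner loop capped at min(B, n-1-i)) whose first strict minimum realises the lexicographic tie-break, and reconstructs the path forward.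
import Mathlib
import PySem

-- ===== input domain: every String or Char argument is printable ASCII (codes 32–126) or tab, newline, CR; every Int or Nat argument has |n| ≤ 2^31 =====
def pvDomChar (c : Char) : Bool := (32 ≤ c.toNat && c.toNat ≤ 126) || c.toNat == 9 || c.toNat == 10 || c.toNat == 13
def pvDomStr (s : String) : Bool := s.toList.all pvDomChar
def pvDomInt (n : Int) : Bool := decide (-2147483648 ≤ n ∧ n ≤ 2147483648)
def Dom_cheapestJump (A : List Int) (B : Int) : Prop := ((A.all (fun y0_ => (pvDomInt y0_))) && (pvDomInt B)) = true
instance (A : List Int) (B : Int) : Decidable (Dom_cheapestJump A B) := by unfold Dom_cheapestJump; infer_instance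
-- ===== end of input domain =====

-- B replaces A's reverse-the-array forward push DP by a backward pull DP with next-pointers
-- on the original array (alternative decomposition); equivalence is about the return value only.

-- ===== PORT A =====

-- update test for dp[i+l]; the `none => false` tie arm is unreachable in A's runs
-- (a cell with some cost and no from-pointer is only cell 0, which is never a push target),
-- where Python would raise TypeError comparing int > None.
def aUpdOk (i v : Int) (cell : Option Int × Option Int) : Bool :=
  match cell with
  | (none, _) => true
  | (some c, f) => v < c || (v == c && (match f with | some f' => f' < i | none => false))

-- inner body: one iteration of `for l in range(1, B+1)` pushing from rev index i
def aInner (Ar : List Int) (i : Int) (dp : List (Option Int × Option Int)) (l : Int) :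
    List (Option Int × Option Int) :=
  if i + l ≥ (Ar.length : Int) then dp
  else if PySem.List.pyGetD Ar (i + l) 0 == -1 then dp
  else if aUpdOk i ((PySem.List.pyGetD dp i ((none, none))).1.getD 0 +
      PySem.List.pyGetD Ar (i + l) 0) (PySem.List.pyGetD dp (i + l) ((none, none))) then
    PySem.List.pySetD dp (i + l)
      (some ((PySem.List.pyGetD dp i ((none, none))).1.getD 0 +
        PySem.List.pyGetD Ar (i + l) 0), some i)
  else dp

-- outer body: one iteration of `for i, coin in enumerate(A)`
def aBody (Ar : List Int) (B : Int) (dp : List (Option Int × Option Int)) (p : Int × Int) :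
    List (Option Int × Option Int) :=
  if p.2 == -1 || (((PySem.List.pyGetD dp p.1 ((none, none))).2 == (none : Option Int)) && !(p.1 == 0)) then dp
  else (PySem.List.pyRange 1 (B + 1) 1).foldl (aInner Ar p.1) dp

-- the `while True` reconstruction; from-pointers strictly decrease, so fuel = len(dp) is exact
-- (fuel 0 is never reached on A's tables)
def aBuild (dp : List (Option Int × Option Int)) (n : Int) : Nat → Int → List Int → List Int
  | 0, _, acc => acc
  | fuel + 1, i, acc =>
    let acc := acc ++ [n - i]
    match (PySem.List.pyGetD dp i ((none, none))).2 with
    | none => acc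
    | some f => aBuild dp n fuel f acc

def cheapestJump (A : List Int) (B : Int) : List Int :=
  if A.length == 1 then [1]
  else
    let Ar := (PySem.List.slice? A none none (-1)).getD []   -- A[::-1]
    let n : Int := (Ar.length : Int)
    let dp0 := (List.replicate Ar.length ((none, none) : Option Int × Option Int)).set 0
      (some (Ar.getD 0 0), none)                             -- dp[0] = (A[0], None)
    let dp := (PySem.List.enumerate Ar 0).foldl (aBody Ar B) dp0
    if (PySem.List.pyGetD dp (-1) ((none, none))).2 == (none : Option Int) then []
    else aBuild dp n Ar.length (n - 1) []

-- ===== PORT B =====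

-- inner body: one candidate l of `for l in range(1, min(B, n-1-i)+1)` relaxing (best, bj)
def bRelax (A : List Int) (cost : List (Option Int)) (i : Int)
    (acc : Option Int × Option Int) (l : Int) : Option Int × Option Int :=
  match PySem.List.pyGetD cost (i + l) none with
  | none => acc
  | some cj =>
    let c := PySem.List.pyGetD A i 0 + cj
    match acc.1 with
    | none => (some c, some (i + l))
    | some best => if c < best then (some c, some (i + l)) else acc

-- outer body: one iteration of `for i in range(n-2, -1, -1)`
def bBody (A : List Int) (B : Int) (n : Int) (st : List (Option Int) × List (Option Int))
    (i : Int) : List (Option Int) × List (Option Int) :=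
  if PySem.List.pyGetD A i 0 == -1 then st
  else
    (PySem.List.pySetD st.1 i ((PySem.List.pyRange 1 (min B (n - 1 - i) + 1) 1).foldl
        (bRelax A st.1 i) ((none, none) : Option Int × Option Int)).1,
     PySem.List.pySetD st.2 i ((PySem.List.pyRange 1 (min B (n - 1 - i) + 1) 1).foldl
        (bRelax A st.1 i) ((none, none) : Option Int × Option Int)).2)

-- the `while i is not None` loop; next-pointers strictly increase, fuel = n is exact
def altBuild (nxt : List (Option Int)) : Nat → Int → List Int → List Int
  | 0, _, acc => acc
  | fuel + 1, i, acc =>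
    let acc := acc ++ [i + 1]
    match PySem.List.pyGetD nxt i none with
    | none => acc
    | some j => altBuild nxt fuel j acc

def cheapestJump_alt (A : List Int) (B : Int) : List Int :=
  if A.length == 1 then [1]
  else
    let n : Int := (A.length : Int)
    let cost0 : List (Option Int) :=
      if PySem.List.pyGetD A (n - 1) 0 == -1 then List.replicate A.length none
      else PySem.List.pySetD (List.replicate A.length none) (n - 1)
        (some (PySem.List.pyGetD A (n - 1) 0))
    let nxt0 : List (Option Int) := List.replicate A.length none
    let st := (PySem.List.pyRange (n - 2) (-1) (-1)).foldl (bBody A B n) (cost0, nxt0)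
    if (PySem.List.pyGetD st.1 0 none) == (none : Option Int) then []
    else altBuild st.2 A.length 0 []

-- ===== PRECONDITION & SPEC =====
-- Pre_ excludes only the empty list, on which Python A raises IndexError (dp[0] = (A[0], None)).
def Pre_cheapestJump (A : List Int) (B : Int) : Prop := A ≠ []
instance (A : List Int) (B : Int) : Decidable (Pre_cheapestJump A B) := by
  unfold Pre_cheapestJump; infer_instance

def pvWitness_cheapestJump : List Int × Int := ([1, 2, -1, 4], 2)

def Spec_cheapestJump (A : List Int) (B : Int) (out : List Int) : Prop := out = cheapestJump_alt A B
instance (A : List Int) (B : Int) (out : List Int) : Decidable (Spec_cheapestJump A B out) := by unfold Spec_cheapestJump; infer_instance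

-- ===== CLAIM (what is proved, stated in full; the proofs are below) =====
def Claim_equal_cheapestJump : Prop := ∀ (A : List Int) (B : Int), Dom_cheapestJump A B → Pre_cheapestJump A B → Spec_cheapestJump A B (cheapestJump A B)

-- ===== LEMMAS AND PROOFS =====

def stepA (acc : Option (Int × Int)) (c : Int × Int) : Option (Int × Int) :=
  match acc with
  | none => some c
  | some (m, _) => if c.1 ≤ m then some c else acc

def stepB (acc : Option (Int × Int)) (c : Int × Int) : Option (Int × Int) :=
  match acc with
  | none => some c
  | some (m, _) => if c.1 < m then some c else acc

def cellOf : Option (Int × Int) → Option Int × Option Int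
  | none => (none, none)
  | some (v, t) => (some v, some t)

lemma cellOf_fst_none (X : Option (Int × Int)) : (cellOf X).1 = none ↔ X = none := by
  cases X with
  | none => simp [cellOf]
  | some p => cases p; simp [cellOf]

lemma cellOf_snd_none (X : Option (Int × Int)) : (cellOf X).2 = none ↔ X = none := by
  cases X with
  | none => simp [cellOf]
  | some p => cases p; simp [cellOf]

lemma stepA_aux (cs : List (Int × Int)) : ∀ c : Int × Int,
    cs.foldl stepA (some c) = stepB (cs.foldl stepA none) c := by
  induction cs with
  | nil => intro c; simp [stepB]
  | cons d cs ih =>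
    intro c
    obtain ⟨dv, dt⟩ := d
    obtain ⟨cv, ct⟩ := c
    simp only [List.foldl_cons]
    by_cases hd : dv ≤ cv
    · have e1 : stepA (some (cv, ct)) (dv, dt) = some (dv, dt) := by simp [stepA, hd]
      have e2 : stepA none (dv, dt) = some (dv, dt) := by simp [stepA]
      rw [e1, e2, ih]
      cases hF : cs.foldl stepA none with
      | none => simp [stepB]; omega
      | some a =>
        obtain ⟨m, t⟩ := a
        simp only [stepB]
        split_ifs with h1 h2 h3 <;> simp_all <;> omega
    · have e1 : stepA (some (cv, ct)) (dv, dt) = some (cv, ct) := by simp [stepA, hd]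
      have e2 : stepA none (dv, dt) = some (dv, dt) := by simp [stepA]
      rw [e1, ih, e2, ih]
      cases hF : cs.foldl stepA none with
      | none => simp [stepB]; omega
      | some a =>
        obtain ⟨m, t⟩ := a
        simp only [stepB]
        split_ifs with h1 h2 h3 <;> simp_all <;> omega

lemma stepA_reverse (cs : List (Int × Int)) :
    cs.foldl stepA none = (cs.reverse).foldl stepB none := by
  induction cs with
  | nil => rfl
  | cons c cs ih =>
    rw [List.foldl_cons, show stepA none c = some c from rfl, stepA_aux, ih,
      List.reverse_cons, List.foldl_append]
    simp

lemma stepB_mem (cs : List (Int × Int)) : ∀ (acc : Option (Int × Int)) (v t : Int),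
    cs.foldl stepB acc = some (v, t) → (v, t) ∈ cs ∨ acc = some (v, t) := by
  induction cs with
  | nil => intro acc v t h; right; simpa using h
  | cons d cs ih =>
    intro acc v t h
    rcases ih _ _ _ h with hm | he
    · exact Or.inl (List.mem_cons_of_mem _ hm)
    · cases acc with
      | none =>
        simp [stepB] at he
        exact Or.inl (by simp [he])
      | some a =>
        obtain ⟨m, t0⟩ := a
        simp only [stepB] at he
        split_ifs at he
        · exact Or.inl (by simp_all)
        · exact Or.inr he

lemma stepB_map_tag (f : Int → Int) (cs : List (Int × Int)) :
    ∀ acc : Option (Int × Int),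
    (cs.map (Prod.map id f)).foldl stepB (acc.map (Prod.map id f)) =
      ((cs.foldl stepB acc).map (Prod.map id f)) := by
  induction cs with
  | nil => intro acc; simp
  | cons d cs ih =>
    intro acc
    obtain ⟨dv, dt⟩ := d
    simp only [List.map_cons, List.foldl_cons]
    have : stepB (acc.map (Prod.map id f)) (Prod.map id f (dv, dt)) =
        (stepB acc (dv, dt)).map (Prod.map id f) := by
      cases acc with
      | none => simp [stepB]
      | some a =>
        obtain ⟨m, t0⟩ := a
        simp only [stepB, Prod.map, Option.map_some, id]
        split_ifs <;> simp
    rw [this, ih]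

lemma filterMap_range_reverse {α : Type} (m : Nat) (f : Nat → Option α) :
    ((List.range m).filterMap f).reverse = (List.range m).filterMap (fun t => f (m - 1 - t)) := by
  induction m generalizing f with
  | zero => simp
  | succ m ih =>
    have lhs : ((List.range (m + 1)).filterMap f).reverse
        = (f m).toList ++ ((List.range m).filterMap f).reverse := by
      rw [List.range_succ, List.filterMap_append, List.reverse_append]
      cases hfm : f m <;> simp [hfm]
    have rhs : (List.range (m + 1)).filterMap (fun t => f (m + 1 - 1 - t))
        = (f m).toList ++ (List.range m).filterMap (fun t => f (m - 1 - t)) := by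
      rw [List.range_succ_eq_map, List.filterMap_cons]
      have htail : (List.map Nat.succ (List.range m)).filterMap (fun t => f (m + 1 - 1 - t)) =
          (List.range m).filterMap (fun t => f (m - 1 - t)) := by
        rw [List.filterMap_map]
        apply List.filterMap_congr
        intro t _
        simp only [Function.comp]
        congr 1
        omega
      have hcg : (List.range m).filterMap (fun x => f (m - (x + 1))) =
          (List.range m).filterMap (fun t => f (m - 1 - t)) := by
        apply List.filterMap_congr
        intro t _
        congr 1
        omega
      cases hfm : f m <;> simp [hfm] <;> rw [← htail] <;> simp [List.filterMap_map, Function.comp]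
    rw [lhs, rhs, ih]

lemma filterMap_range_shorten {α : Type} (M m : Nat) (f : Nat → Option α) (hM : M ≤ m)
    (h : ∀ t, M ≤ t → t < m → f t = none) :
    (List.range m).filterMap f = (List.range M).filterMap f := by
  obtain ⟨d, rfl⟩ : ∃ d, m = M + d := ⟨m - M, by omega⟩
  rw [List.range_add, List.filterMap_append]
  have hnil : ((List.range d).map (M + ·)).filterMap f = [] := by
    rw [List.filterMap_map]
    apply List.filterMap_eq_nil_iff.mpr
    intro t ht
    have htd := List.mem_range.mp ht
    show f (M + t) = none
    exact h _ (by omega) (by omega)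
  simp [hnil]

def pcell (Ar : List Int) (B : Int) : Nat → Nat → Option Int × Option Int
  | j, 0 => if j = 0 then (some (Ar.getD 0 0), none) else (none, none)
  | j, k + 1 =>
    if k < j ∧ ((j : Int) - (k : Int) ≤ B) ∧ Ar.getD j 0 ≠ -1 ∧ Ar.getD k 0 ≠ -1 ∧
        ((pcell Ar B k k).2 ≠ none ∨ k = 0) then
      let v := ((pcell Ar B k k).1).getD 0 + Ar.getD j 0
      if aUpdOk (k : Int) v (pcell Ar B j k) then (some v, some (k : Int)) else pcell Ar B j k
    else pcell Ar B j k
termination_by j k => k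

lemma pcell_succ (Ar : List Int) (B : Int) (j k : Nat) :
    pcell Ar B j (k + 1) =
      if (k < j ∧ ((j : Int) - (k : Int) ≤ B) ∧ Ar.getD j 0 ≠ -1 ∧ Ar.getD k 0 ≠ -1 ∧
          ((pcell Ar B k k).2 ≠ none ∨ k = 0)) then
        (if aUpdOk (k : Int) (((pcell Ar B k k).1).getD 0 + Ar.getD j 0) (pcell Ar B j k) then
          (some (((pcell Ar B k k).1).getD 0 + Ar.getD j 0), some (k : Int))
        else pcell Ar B j k)
      else pcell Ar B j k := by
  simp only [pcell]

lemma pcell_zero (Ar : List Int) (B : Int) (k : Nat) :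
    pcell Ar B 0 k = (some (Ar.getD 0 0), none) := by
  induction k with
  | zero => simp [pcell]
  | succ k ih => simp [pcell, ih]

lemma pcell_blocked (Ar : List Int) (B : Int) (j : Nat) (hj : 1 ≤ j)
    (h : Ar.getD j 0 = -1) : ∀ k, pcell Ar B j k = (none, none) := by
  intro k
  induction k with
  | zero => simp [pcell]; omega
  | succ k ih =>
    rw [pcell_succ]
    simp only [ih]
    split_ifs with hc hc2
    · exact absurd h hc.2.2.1
    · exact absurd h hc.2.2.1
    · rfl

lemma pcell_stable (Ar : List Int) (B : Int) (j : Nat) :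
    ∀ k, j ≤ k → pcell Ar B j k = pcell Ar B j j := by
  intro k
  induction k with
  | zero => intro h; have : j = 0 := by omega
            subst this; rfl
  | succ k ih =>
    intro h
    rcases Nat.lt_or_ge k j with h1 | h2
    · have : j = k + 1 := by omega
      subst this; rfl
    · have e : pcell Ar B j (k + 1) = pcell Ar B j k := by
        rw [pcell_succ]
        split_ifs with hc hc2
        · exact absurd hc.1 (by omega)
        · exact absurd hc.1 (by omega)
        · rfl
      rw [e]; exact ih h2

def PA (Ar : List Int) (B : Int) (j k : Nat) : List (Int × Int) :=
  (List.range (min j k)).filterMap (fun (s : Nat) =>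
    if ((j : Int) - (s : Int) ≤ B ∧ Ar.getD s 0 ≠ -1 ∧
        ((pcell Ar B s s).2 ≠ none ∨ s = 0)) then
      some (((pcell Ar B s s).1).getD 0 + Ar.getD j 0, (s : Int))
    else none)

lemma pcell_fold (Ar : List Int) (B : Int) (j : Nat) (hj : 1 ≤ j)
    (hAr : Ar.getD j 0 ≠ -1) : ∀ k,
    pcell Ar B j k = cellOf ((PA Ar B j k).foldl stepA none) ∧
    (∀ v t, (PA Ar B j k).foldl stepA none = some (v, t) → 0 ≤ t ∧ t < ((min j k : Nat) : Int)) := by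
  intro k
  induction k with
  | zero =>
    constructor
    · have h0 : pcell Ar B j 0 = (none, none) := by
        simp [pcell]; omega
      simp [h0, PA, cellOf]
    · intro v t h
      simp [PA] at h
  | succ k ih =>
    obtain ⟨ih1, ih2⟩ := ih
    by_cases hkj : k < j
    · have hmink : min j k = k := by omega
      have hmin1 : min j (k + 1) = k + 1 := by omega
      have hPA : PA Ar B j (k + 1) = PA Ar B j k ++
          (if (((j : Int) - (k : Int) ≤ B ∧ Ar.getD k 0 ≠ -1 ∧
              ((pcell Ar B k k).2 ≠ none ∨ k = 0))) then
            [(((pcell Ar B k k).1).getD 0 + Ar.getD j 0, (k : Int))]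
          else []) := by
        unfold PA
        rw [hmin1, hmink, List.range_succ, List.filterMap_append]
        congr 1
        simp only [List.filterMap_cons, List.filterMap_nil]
        split_ifs with h1
        · rfl
        · rfl
      by_cases hc : ((j : Int) - (k : Int) ≤ B ∧ Ar.getD k 0 ≠ -1 ∧
          ((pcell Ar B k k).2 ≠ none ∨ k = 0))
      · rw [hPA, if_pos hc]
        have hstep : pcell Ar B j (k + 1) =
            (if aUpdOk (k : Int) (((pcell Ar B k k).1).getD 0 + Ar.getD j 0) (pcell Ar B j k) then
              (some (((pcell Ar B k k).1).getD 0 + Ar.getD j 0), some (k : Int))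
            else pcell Ar B j k) := by
          rw [pcell_succ, if_pos (⟨hkj, hc.1, hAr, hc.2.1, hc.2.2⟩ :
            (k < j ∧ ((j : Int) - (k : Int) ≤ B) ∧ Ar.getD j 0 ≠ -1 ∧ Ar.getD k 0 ≠ -1 ∧
              ((pcell Ar B k k).2 ≠ none ∨ k = 0)))]
        rw [List.foldl_append, List.foldl_cons, List.foldl_nil, hstep]
        set v := ((pcell Ar B k k).1).getD 0 + Ar.getD j 0 with hv
        cases hX : (PA Ar B j k).foldl stepA none with
        | none =>
          rw [ih1, hX]
          constructor
          · simp [cellOf, stepA, aUpdOk]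
          · intro v' t' h'
            simp only [stepA] at h'
            injection h' with h''
            injection h'' with h1 h2
            constructor <;> omega
        | some a =>
          obtain ⟨c, t⟩ := a
          obtain ⟨ht0, htk⟩ := ih2 c t hX
          have htk' : t < (k : Int) := by
            rw [hmink] at htk; exact htk
          rw [ih1, hX]
          have hupd : aUpdOk (k : Int) v (cellOf (some (c, t))) = decide (v ≤ c) := by
            simp only [cellOf, aUpdOk]
            by_cases h1 : v < c
            · have h1' : v ≤ c := le_of_lt h1
              simp [h1, h1']
            · by_cases h2 : v = c
              · subst h2
                simp [h1, htk']
              · have h3 : ¬ v ≤ c := by omega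
                simp [h1, h2, h3]
          rw [hupd]
          constructor
          · by_cases hle : v ≤ c
            · simp only [stepA, hle, if_pos, decide_eq_true_eq, hle, if_true]
              simp [hle, cellOf]
            · simp only [stepA]
              simp [hle, cellOf]
          · intro v' t' h'
            simp only [stepA] at h'
            split_ifs at h' <;> injection h' with h'' <;> injection h'' with h1 h2 <;>
              constructor <;> omega
      · rw [hPA, if_neg hc, List.append_nil]
        have e : pcell Ar B j (k + 1) = pcell Ar B j k := by
          rw [pcell_succ]
          split_ifs with h2 h3
          · exact absurd ⟨h2.2.1, h2.2.2.2.1, h2.2.2.2.2⟩ hc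
          · exact absurd ⟨h2.2.1, h2.2.2.2.1, h2.2.2.2.2⟩ hc
          · rfl
        refine ⟨by rw [e, ih1], ?_⟩
        intro v t h
        obtain ⟨h1, h2⟩ := ih2 v t h
        refine ⟨h1, lt_of_lt_of_le h2 (by simp)⟩
    · have hmin : min j (k + 1) = min j k := by omega
      have hPA : PA Ar B j (k + 1) = PA Ar B j k := by
        unfold PA; rw [hmin]
      have e : pcell Ar B j (k + 1) = pcell Ar B j k := by
        rw [pcell_succ]
        split_ifs with h2 h3
        · exact absurd h2.1 hkj
        · exact absurd h2.1 hkj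
        · rfl
      rw [hPA, e]
      refine ⟨ih1, ?_⟩
      intro v t h
      obtain ⟨h1, h2⟩ := ih2 v t h
      exact ⟨h1, by rw [hmin]; exact h2⟩

-- ===== A-side loop invariant =====

def ainit (Ar : List Int) : List (Option Int × Option Int) :=
  (List.replicate Ar.length ((none, none) : Option Int × Option Int)).set 0
    (some (Ar.getD 0 0), none)

def astate (Ar : List Int) (B : Int) (k : Nat) : List (Option Int × Option Int) :=
  ((PySem.List.enumerate Ar 0).take k).foldl (aBody Ar B) (ainit Ar)

lemma aInner_length (Ar : List Int) (i l : Int) (dp : List (Option Int × Option Int)) :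
    (aInner Ar i dp l).length = dp.length := by
  unfold aInner
  split_ifs <;> simp [PySem.List.length_pySetD]

lemma aInner_getD (Ar : List Int) (k : Nat) (dp : List (Option Int × Option Int))
    (hlen : dp.length = Ar.length) (l : Int) (hl : 1 ≤ l) (m : Nat) (hm : m < Ar.length) :
    (aInner Ar (k : Int) dp l).getD m (none, none) =
      if ((m : Int) - (k : Int) = l) ∧ Ar.getD m 0 ≠ -1 then
        (if aUpdOk (k : Int) ((dp.getD k (none, none)).1.getD 0 + Ar.getD m 0)
            (dp.getD m (none, none)) then
          (some ((dp.getD k (none, none)).1.getD 0 + Ar.getD m 0), some (k : Int))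
        else dp.getD m (none, none))
      else dp.getD m (none, none) := by
  unfold aInner
  by_cases hge : (k : Int) + l ≥ (Ar.length : Int)
  · rw [if_pos hge, if_neg]
    rintro ⟨h1, _⟩
    omega
  · rw [if_neg hge]
    push_neg at hge
    have h0 : (0 : Int) ≤ (k : Int) + l := by omega
    have hj0 : (((k + l.toNat : Nat)) : Int) = (k : Int) + l := by
      push_cast [Int.toNat_of_nonneg (by omega : (0 : Int) ≤ l)]
      ring
    set j0 : Nat := k + l.toNat with hj0def
    have hj0n : j0 < Ar.length := by omega
    simp only [← hj0, PySem.List.pyGetD_natCast, PySem.List.pySetD_natCast]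
    by_cases hA : Ar.getD j0 0 = -1
    · rw [if_pos (by simpa using hA), if_neg]
      rintro ⟨h1, h2⟩
      have : m = j0 := by omega
      subst this
      exact h2 hA
    · rw [if_neg (by simpa using hA)]
      by_cases hmj : m = j0
      · subst hmj
        have hcnd : (((j0 : Nat) : Int) - (k : Int) = l) ∧ Ar.getD j0 0 ≠ -1 := ⟨by omega, hA⟩
        rw [if_pos hcnd]
        by_cases hu : aUpdOk (k : Int) ((dp.getD k (none, none)).1.getD 0 + Ar.getD j0 0)
            (dp.getD j0 (none, none)) = true
        · rw [if_pos hu, if_pos hu, List.getD_eq_getElem?_getD, List.getElem?_set]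
          simp [hlen, hj0n]
        · rw [if_neg hu, if_neg hu]
      · have hcnd : ¬ ((((m : Nat) : Int) - (k : Int) = l) ∧ Ar.getD m 0 ≠ -1) := by
          rintro ⟨h1, _⟩
          exact hmj (by omega)
        rw [if_neg hcnd]
        by_cases hu : aUpdOk (k : Int) ((dp.getD k (none, none)).1.getD 0 + Ar.getD j0 0)
            (dp.getD j0 (none, none)) = true
        · rw [if_pos hu, List.getD_eq_getElem?_getD, List.getElem?_set]
          simp only [show ¬ (j0 = m) by omega, if_false]
          rw [← List.getD_eq_getElem?_getD]
        · rw [if_neg hu]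

lemma ainner_fold (Ar : List Int) (k : Nat) (hk : k < Ar.length) :
    ∀ (ls : List Int), ls.Nodup → (∀ l ∈ ls, 1 ≤ l) →
    ∀ dp : List (Option Int × Option Int), dp.length = Ar.length →
    (ls.foldl (aInner Ar (k : Int)) dp).length = Ar.length ∧
    ∀ j, j < Ar.length →
      (ls.foldl (aInner Ar (k : Int)) dp).getD j (none, none) =
        if ((j : Int) - (k : Int)) ∈ ls ∧ k < j ∧ Ar.getD j 0 ≠ -1 then
          (if aUpdOk (k : Int) ((dp.getD k (none, none)).1.getD 0 + Ar.getD j 0)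
              (dp.getD j (none, none)) then
            (some ((dp.getD k (none, none)).1.getD 0 + Ar.getD j 0), some (k : Int))
          else dp.getD j (none, none))
        else dp.getD j (none, none) := by
  intro ls
  induction ls with
  | nil =>
    intro _ _ dp hlen
    refine ⟨hlen, ?_⟩
    intro j hj
    simp
  | cons l0 ls ih =>
    intro hnd hpos dp hlen
    have hl0 : (1 : Int) ≤ l0 := hpos l0 List.mem_cons_self
    have hnd' : ls.Nodup := (List.nodup_cons.mp hnd).2
    have hl0nin : l0 ∉ ls := (List.nodup_cons.mp hnd).1
    have hpos' : ∀ l ∈ ls, (1 : Int) ≤ l := fun l hl => hpos l (List.mem_cons_of_mem _ hl)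
    set dp' := aInner Ar (k : Int) dp l0 with hdp'
    have hlen' : dp'.length = Ar.length := by
      rw [hdp', aInner_length]; exact hlen
    have hget' : ∀ m : Nat, m < Ar.length →
        dp'.getD m (none, none) =
          if ((m : Int) - (k : Int) = l0) ∧ Ar.getD m 0 ≠ -1 then
            (if aUpdOk (k : Int) ((dp.getD k (none, none)).1.getD 0 + Ar.getD m 0)
                (dp.getD m (none, none)) then
              (some ((dp.getD k (none, none)).1.getD 0 + Ar.getD m 0), some (k : Int))
            else dp.getD m (none, none))
          else dp.getD m (none, none) := by
      intro m hm
      rw [hdp']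
      exact aInner_getD Ar k dp hlen l0 hl0 m hm
    have hgetk : dp'.getD k (none, none) = dp.getD k (none, none) := by
      rw [hget' k hk, if_neg]
      rintro ⟨h1, _⟩
      omega
    obtain ⟨ihlen, ihf⟩ := ih hnd' hpos' dp' hlen'
    refine ⟨by rw [List.foldl_cons]; exact ihlen, ?_⟩
    intro j hj
    rw [List.foldl_cons, ihf j hj]
    by_cases hjl : (j : Int) - (k : Int) = l0
    · have hmem : ¬ ((j : Int) - (k : Int)) ∈ ls := by rw [hjl]; exact hl0nin
      rw [if_neg (by rintro ⟨h1, _⟩; exact hmem h1)]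
      rw [hget' j hj]
      by_cases hA : Ar.getD j 0 ≠ -1
      · have hc1 : ((j : Int) - (k : Int) = l0) ∧ Ar.getD j 0 ≠ -1 := ⟨hjl, hA⟩
        have hc2 : ((j : Int) - (k : Int)) ∈ l0 :: ls ∧ k < j ∧ Ar.getD j 0 ≠ -1 :=
          ⟨by rw [hjl]; exact List.mem_cons_self, by omega, hA⟩
        rw [if_pos hc1, if_pos hc2]
      · rw [if_neg (by rintro ⟨_, h2⟩; exact hA h2),
          if_neg (by rintro ⟨_, _, h3⟩; exact hA h3)]
    · have hrj : dp'.getD j (none, none) = dp.getD j (none, none) := by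
        rw [hget' j hj, if_neg]
        rintro ⟨h1, _⟩
        exact hjl h1
      rw [hgetk, hrj]
      by_cases hm : ((j : Int) - (k : Int)) ∈ ls ∧ k < j ∧ Ar.getD j 0 ≠ -1
      · have hc2 : ((j : Int) - (k : Int)) ∈ l0 :: ls ∧ k < j ∧ Ar.getD j 0 ≠ -1 :=
          ⟨List.mem_cons_of_mem _ hm.1, hm.2⟩
        rw [if_pos hm, if_pos hc2]
      · rw [if_neg hm, if_neg]
        rintro ⟨h1, h2⟩
        rcases List.mem_cons.mp h1 with h | h
        · exact hjl h
        · exact hm ⟨h, h2⟩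

lemma astate_spec (Ar : List Int) (B : Int) : ∀ k, k ≤ Ar.length →
    (astate Ar B k).length = Ar.length ∧
    ∀ j, j < Ar.length → (astate Ar B k).getD j (none, none) = pcell Ar B j k := by
  intro k
  induction k with
  | zero =>
    intro _
    refine ⟨by simp [astate, ainit], ?_⟩
    intro j hj
    simp only [astate, List.take_zero, List.foldl_nil]
    unfold ainit
    rcases Nat.eq_zero_or_pos j with rfl | hjpos
    · rw [pcell_zero]
      rw [List.getD_eq_getElem?_getD, List.getElem?_set]
      simp [hj]
    · have h0 : pcell Ar B j 0 = (none, none) := by simp [pcell]; omega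
      rw [h0, List.getD_eq_getElem?_getD, List.getElem?_set]
      simp [List.getElem?_replicate, hj, show ¬ (0 = j) by omega]
  | succ k ih =>
    intro hk1
    have hkn : k < Ar.length := by omega
    obtain ⟨ih1, ih2⟩ := ih (by omega)
    have henum : (PySem.List.enumerate Ar 0)[k]? = some (((k : Nat) : Int), Ar.getD k 0) := by
      rw [PySem.List.getElem?_enumerate, List.getElem?_eq_getElem hkn]
      simp [List.getD_eq_getElem?_getD, List.getElem?_eq_getElem hkn]
    have hstep : astate Ar B (k + 1) =
        aBody Ar B (astate Ar B k) (((k : Nat) : Int), Ar.getD k 0) := by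
      unfold astate
      rw [List.take_add_one, henum]
      simp [List.foldl_append]
    rw [hstep]
    unfold aBody
    simp only []
    rw [PySem.List.pyGetD_natCast, ih2 k hkn]
    by_cases hcoin : Ar.getD k 0 = -1
    · have hgT : (Ar.getD k 0 == -1 ||
          ((pcell Ar B k k).2 == (none : Option Int) && !(((k : Nat) : Int) == 0))) = true := by
        rw [Bool.or_eq_true]
        left
        simpa using hcoin
      rw [if_pos hgT]
      refine ⟨ih1, ?_⟩
      intro j hj
      rw [ih2 j hj, pcell_succ]
      split_ifs with hc hc2
      · exact absurd hcoin hc.2.2.2.1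
      · exact absurd hcoin hc.2.2.2.1
      · rfl
    · by_cases hdead : (pcell Ar B k k).2 = none ∧ k ≠ 0
      · have hknz : ((k : Nat) : Int) ≠ 0 := Int.natCast_ne_zero.mpr hdead.2
        have hgT : (Ar.getD k 0 == -1 ||
            ((pcell Ar B k k).2 == (none : Option Int) && !(((k : Nat) : Int) == 0))) = true := by
          rw [Bool.or_eq_true, Bool.and_eq_true]
          right
          exact ⟨by simp [hdead.1], by simp; exact hdead.2⟩
        rw [if_pos hgT]
        refine ⟨ih1, ?_⟩
        intro j hj
        rw [ih2 j hj, pcell_succ]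
        split_ifs with hc hc2
        · rcases hc.2.2.2.2 with h | h
          · exact absurd hdead.1 h
          · exact absurd h hdead.2
        · rcases hc.2.2.2.2 with h | h
          · exact absurd hdead.1 h
          · exact absurd h hdead.2
        · rfl
      · have hlive : (pcell Ar B k k).2 ≠ none ∨ k = 0 := by
          by_cases h1 : k = 0
          · exact Or.inr h1
          · exact Or.inl (fun h2 => hdead ⟨h2, h1⟩)
        have hgate : ¬ ((Ar.getD k 0 == -1 ||
            ((pcell Ar B k k).2 == (none : Option Int) && !(((k : Nat) : Int) == 0))) = true) := by
          intro hcontra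
          rw [Bool.or_eq_true] at hcontra
          rcases hcontra with h | h
          · exact hcoin (by simpa using h)
          · rw [Bool.and_eq_true] at h
            obtain ⟨h1, h2⟩ := h
            have hk0 : k ≠ 0 := by
              intro hk0
              subst hk0
              simp at h2
            exact hdead ⟨by simpa using h1, hk0⟩
        rw [if_neg hgate]
        have hnodup : (PySem.List.pyRange 1 (B + 1) 1).Nodup := PySem.List.nodup_pyRange_one 1 (B + 1)
        have hposl : ∀ l ∈ PySem.List.pyRange 1 (B + 1) 1, (1 : Int) ≤ l :=
          fun l hl => ((PySem.List.mem_pyRange_one.mp hl).1)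
        obtain ⟨flen, ff⟩ := ainner_fold Ar k hkn (PySem.List.pyRange 1 (B + 1) 1)
          hnodup hposl (astate Ar B k) ih1
        refine ⟨flen, ?_⟩
        intro j hj
        rw [ff j hj, ih2 k hkn, ih2 j hj, pcell_succ]
        by_cases hcond : k < j ∧ ((j : Int) - (k : Int) ≤ B) ∧ Ar.getD j 0 ≠ -1
        · have hm1 : ((j : Int) - (k : Int)) ∈ PySem.List.pyRange 1 (B + 1) 1 ∧ k < j ∧
              Ar.getD j 0 ≠ -1 :=
            ⟨PySem.List.mem_pyRange_one.mpr ⟨by omega, by omega⟩, hcond.1, hcond.2.2⟩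
          have hc2 : k < j ∧ ((j : Int) - (k : Int) ≤ B) ∧ Ar.getD j 0 ≠ -1 ∧
              Ar.getD k 0 ≠ -1 ∧ ((pcell Ar B k k).2 ≠ none ∨ k = 0) :=
            ⟨hcond.1, hcond.2.1, hcond.2.2, hcoin, hlive⟩
          rw [if_pos hm1, if_pos hc2]
        · rw [if_neg (fun hh : ((j : Int) - (k : Int)) ∈ PySem.List.pyRange 1 (B + 1) 1 ∧
              k < j ∧ Ar.getD j 0 ≠ -1 => by
                obtain ⟨m1, m2, m3⟩ := hh
                have := PySem.List.mem_pyRange_one.mp m1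
                exact hcond ⟨m2, by omega, m3⟩),
            if_neg (fun hh : k < j ∧ ((j : Int) - (k : Int) ≤ B) ∧ Ar.getD j 0 ≠ -1 ∧
              Ar.getD k 0 ≠ -1 ∧ ((pcell Ar B k k).2 ≠ none ∨ k = 0) => by
                exact hcond ⟨hh.1, hh.2.1, hh.2.2.1⟩)]

lemma getD_replicate_none {α : Type} (n p : Nat) :
    (List.replicate n (none : Option α)).getD p none = none := by
  rw [List.getD_eq_getElem?_getD, List.getElem?_replicate]
  split <;> rfl

def binit (A : List Int) : List (Option Int) × List (Option Int) :=
  (if PySem.List.pyGetD A ((A.length : Int) - 1) 0 == -1 then List.replicate A.length none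
   else PySem.List.pySetD (List.replicate A.length none) ((A.length : Int) - 1)
     (some (PySem.List.pyGetD A ((A.length : Int) - 1) 0)),
   List.replicate A.length none)

def bstate (A : List Int) (B : Int) (m : Nat) : List (Option Int) × List (Option Int) :=
  ((PySem.List.pyRange ((A.length : Int) - 2) (-1) (-1)).take m).foldl
    (bBody A B (A.length : Int)) (binit A)

def bcost (A : List Int) (B : Int) (p : Nat) : Option Int :=
  (bstate A B (A.length - 1)).1.getD p none

def bnxt (A : List Int) (B : Int) (p : Nat) : Option Int :=
  (bstate A B (A.length - 1)).2.getD p none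

def PB (A : List Int) (B : Int) (p : Nat) : List (Int × Int) :=
  (List.range ((min B ((A.length : Int) - 1 - (p : Int))).toNat)).filterMap (fun (t : Nat) =>
    (bcost A B (p + t + 1)).map (fun c =>
      (A.getD p 0 + c, ((p + t + 1 : Nat) : Int))))

lemma brange (A : List Int) (hn : 2 ≤ A.length) :
    PySem.List.pyRange ((A.length : Int) - 2) (-1) (-1) =
      (List.range (A.length - 1)).map (fun (m : Nat) => (A.length : Int) - 2 - (m : Int)) := by
  rw [PySem.List.pyRange_neg_one]
  have h1 : (((A.length : Int) - 2) - (-1)).toNat = A.length - 1 := by omega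
  rw [h1]

lemma bstate_succ (A : List Int) (B : Int) (hn : 2 ≤ A.length) (m : Nat)
    (hm : m < A.length - 1) :
    bstate A B (m + 1) =
      bBody A B (A.length : Int) (bstate A B m) ((A.length : Int) - 2 - (m : Int)) := by
  unfold bstate
  rw [brange A hn, List.take_add_one]
  have he : ((List.range (A.length - 1)).map
      (fun (m : Nat) => (A.length : Int) - 2 - (m : Int)))[m]? =
      some ((A.length : Int) - 2 - (m : Int)) := by
    simp [List.getElem?_map, List.getElem?_range, hm]
  rw [he]
  simp [List.foldl_append]

lemma bBody_length (A : List Int) (B n i : Int) (st : List (Option Int) × List (Option Int)) :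
    (bBody A B n st i).1.length = st.1.length ∧ (bBody A B n st i).2.length = st.2.length := by
  unfold bBody
  split_ifs
  · exact ⟨rfl, rfl⟩
  · exact ⟨PySem.List.length_pySetD _ _ _, PySem.List.length_pySetD _ _ _⟩

lemma bstate_length (A : List Int) (B : Int) (hn : 2 ≤ A.length) :
    ∀ m, m ≤ A.length - 1 →
    (bstate A B m).1.length = A.length ∧ (bstate A B m).2.length = A.length := by
  intro m
  induction m with
  | zero =>
    intro _
    constructor
    · unfold bstate binit
      simp only [List.take_zero, List.foldl_nil]
      split_ifs <;> simp [PySem.List.length_pySetD]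
    · simp [bstate, binit]
  | succ m ih =>
    intro hm
    obtain ⟨h1, h2⟩ := ih (by omega)
    rw [bstate_succ A B hn m (by omega)]
    obtain ⟨g1, g2⟩ := bBody_length A B (A.length : Int) ((A.length : Int) - 2 - (m : Int))
      (bstate A B m)
    exact ⟨by rw [g1, h1], by rw [g2, h2]⟩

lemma buntouched (A : List Int) (B : Int) (hn : 2 ≤ A.length) :
    ∀ m, m ≤ A.length - 1 → ∀ p : Nat, p < A.length - 1 - m →
    (bstate A B m).1.getD p none = none ∧ (bstate A B m).2.getD p none = none := by
  intro m
  induction m with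
  | zero =>
    intro _ p hp
    unfold bstate binit
    simp only [List.take_zero, List.foldl_nil]
    constructor
    · split_ifs with h1
      · exact getD_replicate_none _ _
      · have hcast : ((A.length : Int) - 1) = ((A.length - 1 : Nat) : Int) := by omega
        rw [hcast, PySem.List.pySetD_natCast]
        rw [List.getD_eq_getElem?_getD, List.getElem?_set]
        simp only [show ¬ (A.length - 1 = p) by omega, if_false]
        rw [← List.getD_eq_getElem?_getD]
        exact getD_replicate_none _ _
    · exact getD_replicate_none _ _
  | succ m ih =>
    intro hm p hp
    obtain ⟨h1, h2⟩ := ih (by omega) p (by omega)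
    rw [bstate_succ A B hn m (by omega)]
    unfold bBody
    split_ifs with hc
    · exact ⟨h1, h2⟩
    · obtain ⟨l1, l2⟩ := bstate_length A B hn m (by omega)
      have hcast : ((A.length : Int) - 2 - (m : Int)) = ((A.length - 2 - m : Nat) : Int) := by
        omega
      rw [hcast, PySem.List.pySetD_natCast, PySem.List.pySetD_natCast]
      constructor
      · rw [List.getD_eq_getElem?_getD, List.getElem?_set]
        simp only [show ¬ (A.length - 2 - m = p) by omega, if_false]
        rw [← List.getD_eq_getElem?_getD]
        exact h1
      · rw [List.getD_eq_getElem?_getD, List.getElem?_set]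
        simp only [show ¬ (A.length - 2 - m = p) by omega, if_false]
        rw [← List.getD_eq_getElem?_getD]
        exact h2

lemma bfinal (A : List Int) (B : Int) (hn : 2 ≤ A.length) :
    ∀ t, t ≤ A.length - 1 → ∀ p : Nat, t ≤ p → p < A.length →
    (bstate A B (A.length - 1 - t)).1.getD p none = bcost A B p ∧
    (bstate A B (A.length - 1 - t)).2.getD p none = bnxt A B p := by
  intro t
  induction t with
  | zero => intro _ p _ _; exact ⟨rfl, rfl⟩
  | succ t ih =>
    intro ht p hp hpn
    have hm : A.length - 1 - t = (A.length - 1 - (t + 1)) + 1 := by omega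
    have hstep : bstate A B (A.length - 1 - t) =
        bBody A B (A.length : Int) (bstate A B (A.length - 1 - (t + 1)))
          ((A.length : Int) - 2 - ((A.length - 1 - (t + 1) : Nat) : Int)) := by
      rw [hm]
      exact bstate_succ A B hn _ (by omega)
    have hwr : ((A.length : Int) - 2 - ((A.length - 1 - (t + 1) : Nat) : Int)) = (t : Int) := by
      omega
    obtain ⟨f1, f2⟩ := ih (by omega) p (by omega) hpn
    rw [hstep, hwr] at f1 f2
    obtain ⟨l1, l2⟩ := bstate_length A B hn (A.length - 1 - (t + 1)) (by omega)
    constructor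
    · rw [← f1]
      unfold bBody
      split_ifs with hc
      · rfl
      · simp only [PySem.List.pySetD_natCast, List.getD_eq_getElem?_getD, List.getElem?_set,
          show ¬ (t = p) by omega, if_false]
    · rw [← f2]
      unfold bBody
      split_ifs with hc
      · rfl
      · simp only [PySem.List.pySetD_natCast, List.getD_eq_getElem?_getD, List.getElem?_set,
          show ¬ (t = p) by omega, if_false]

lemma bread (A : List Int) (B : Int) (hn : 2 ≤ A.length) (m : Nat) (hm : m ≤ A.length - 1)
    (p : Nat) (hp : A.length - 1 - m ≤ p) (hpn : p < A.length) :
    (bstate A B m).1.getD p none = bcost A B p ∧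
    (bstate A B m).2.getD p none = bnxt A B p := by
  have h := bfinal A B hn (A.length - 1 - m) (by omega) p (by omega) hpn
  have : A.length - 1 - (A.length - 1 - m) = m := by omega
  rwa [this] at h

lemma brelax_fold (A : List Int) (cost : List (Option Int)) (p : Int) :
    ∀ (ls : List Int) (acc : Option (Int × Int)),
    ls.foldl (bRelax A cost p) (cellOf acc) =
    cellOf ((ls.filterMap (fun l => (PySem.List.pyGetD cost (p + l) none).map
        (fun c => (PySem.List.pyGetD A p 0 + c, p + l)))).foldl stepB acc) := by
  intro ls
  induction ls with
  | nil => intro acc; simp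
  | cons l ls ih =>
    intro acc
    rw [List.foldl_cons, List.filterMap_cons]
    cases hc : PySem.List.pyGetD cost (p + l) none with
    | none =>
      have hb : bRelax A cost p (cellOf acc) l = cellOf acc := by
        unfold bRelax; rw [hc]
      rw [hb]
      exact ih acc
    | some cj =>
      have hb : bRelax A cost p (cellOf acc) l =
          cellOf (stepB acc (PySem.List.pyGetD A p 0 + cj, p + l)) := by
        unfold bRelax; rw [hc]
        cases acc with
        | none => simp [cellOf, stepB]
        | some a =>
          obtain ⟨m, t⟩ := a
          simp only [cellOf, stepB]
          split_ifs <;> rfl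
      rw [hb]
      exact ih (stepB acc (PySem.List.pyGetD A p 0 + cj, p + l))

lemma brecur (A : List Int) (B : Int) (hn : 2 ≤ A.length) (p : Nat)
    (hp : p ≤ A.length - 2) :
    (bcost A B p, bnxt A B p) =
      if A.getD p 0 = -1 then (none, none) else cellOf ((PB A B p).foldl stepB none) := by
  set m0 := A.length - 2 - p with hm0
  have hm01 : m0 + 1 ≤ A.length - 1 := by omega
  obtain ⟨r1, r2⟩ := bread A B hn (m0 + 1) hm01 p (by omega) (by omega)
  have hwr : ((A.length : Int) - 2 - (m0 : Int)) = ((p : Nat) : Int) := by push_cast; omega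
  rw [bstate_succ A B hn m0 (by omega), hwr] at r1 r2
  obtain ⟨l1, l2⟩ := bstate_length A B hn m0 (by omega)
  unfold bBody at r1 r2
  rw [PySem.List.pyGetD_natCast] at r1 r2
  by_cases hA : A.getD p 0 = -1
  · rw [if_pos hA]
    rw [if_pos (by simpa using hA)] at r1 r2
    obtain ⟨u1, u2⟩ := buntouched A B hn m0 (by omega) p (by omega)
    rw [← r1, ← r2, u1, u2]
  · rw [if_neg hA]
    rw [if_neg (by simpa using hA)] at r1 r2
    simp only [PySem.List.pySetD_natCast] at r1 r2
    rw [List.getD_eq_getElem?_getD, List.getElem?_set] at r1 r2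
    simp only [if_pos rfl, l1, l2, show p < A.length by omega, if_true] at r1 r2
    -- r1 : Option.getD (some r.1) none = bcost p ...
    have hfold := brelax_fold A (bstate A B m0).1 ((p : Nat) : Int)
      (PySem.List.pyRange 1 (min B ((A.length : Int) - 1 - ((p : Nat) : Int)) + 1) 1) none
    simp only [cellOf] at hfold
    have hL : (PySem.List.pyRange 1 (min B ((A.length : Int) - 1 - ((p : Nat) : Int)) + 1)
        1).filterMap (fun l => (PySem.List.pyGetD (bstate A B m0).1 (((p : Nat) : Int) + l)
          none).map (fun c => (PySem.List.pyGetD A ((p : Nat) : Int) 0 + c,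
            ((p : Nat) : Int) + l))) = PB A B p := by
      rw [PySem.List.pyRange_one]
      have harith : (min B ((A.length : Int) - 1 - ((p : Nat) : Int)) + 1 - 1).toNat =
          (min B ((A.length : Int) - 1 - ((p : Nat) : Int))).toNat := by omega
      rw [harith, List.filterMap_map]
      unfold PB
      apply List.filterMap_congr
      intro t ht
      have htM := List.mem_range.mp ht
      have hidx : (1 : Int) + (t : Int) = ((t + 1 : Nat) : Int) := by push_cast; ring
      have hcast : ((p : Nat) : Int) + ((1 : Int) + (t : Int)) = ((p + t + 1 : Nat) : Int) := by
        push_cast; ring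
      have hlt : p + t + 1 < A.length := by
        have : (t : Int) < min B ((A.length : Int) - 1 - ((p : Nat) : Int)) := by
          omega
        omega
      obtain ⟨b1, _⟩ := bread A B hn m0 (by omega) (p + t + 1) (by omega) hlt
      show (PySem.List.pyGetD (bstate A B m0).1 (((p : Nat) : Int) + ((1 : Int) + (t : Int)))
          none).map _ = _
      rw [hcast]
      simp only [PySem.List.pyGetD_natCast]
      rw [b1]
    rw [hfold, hL] at r1 r2
    -- now r1/r2 say the components are the cellOf components
    rw [← r1, ← r2]
    cases hX : (PB A B p).foldl stepB none with
    | none => simp [cellOf]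
    | some a => obtain ⟨v, t⟩ := a; simp [cellOf]

-- ===== remaining B-side facts =====

lemma bcost_last (A : List Int) (B : Int) (hn : 2 ≤ A.length) :
    bcost A B (A.length - 1) =
      (if A.getD (A.length - 1) 0 = -1 then none else some (A.getD (A.length - 1) 0)) ∧
    bnxt A B (A.length - 1) = none := by
  obtain ⟨r1, r2⟩ := bread A B hn 0 (by omega) (A.length - 1) (by omega) (by omega)
  rw [← r1, ← r2]
  unfold bstate binit
  simp only [List.take_zero, List.foldl_nil]
  have hcast : ((A.length : Int) - 1) = ((A.length - 1 : Nat) : Int) := by omega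
  rw [hcast, PySem.List.pyGetD_natCast, PySem.List.pySetD_natCast]
  constructor
  · split_ifs with h1 h2 h3
    · exact getD_replicate_none _ _
    · exact absurd (by simpa using h1) h2
    · exact absurd (by simpa using h3) (by simpa using h1)
    · rw [List.getD_eq_getElem?_getD, List.getElem?_set]
      simp [show A.length - 1 < A.length by omega]
  · exact getD_replicate_none _ _

lemma bcell_blocked (A : List Int) (B : Int) (p : Nat) (hn : 2 ≤ A.length)
    (hp : p ≤ A.length - 2) (h : A.getD p 0 = -1) :
    bcost A B p = none ∧ bnxt A B p = none := by
  have hh := brecur A B hn p hp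
  rw [if_pos h] at hh
  exact ⟨congrArg Prod.fst hh, congrArg Prod.snd hh⟩

lemma bcell_eq (A : List Int) (B : Int) (p : Nat) (hn : 2 ≤ A.length)
    (hp : p ≤ A.length - 2) (h : A.getD p 0 ≠ -1) :
    (bcost A B p, bnxt A B p) = cellOf ((PB A B p).foldl stepB none) := by
  have hh := brecur A B hn p hp
  rwa [if_neg h] at hh

lemma bcell_both_none (A : List Int) (B : Int) (p : Nat) (hn : 2 ≤ A.length)
    (hp : p ≤ A.length - 2) : (bcost A B p = none ↔ bnxt A B p = none) := by
  by_cases hA : A.getD p 0 = -1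
  · obtain ⟨h1, h2⟩ := bcell_blocked A B p hn hp hA
    simp [h1, h2]
  · have h := bcell_eq A B p hn hp hA
    have h1 : bcost A B p = (cellOf ((PB A B p).foldl stepB none)).1 := congrArg Prod.fst h
    have h2 : bnxt A B p = (cellOf ((PB A B p).foldl stepB none)).2 := congrArg Prod.snd h
    rw [h1, h2, cellOf_fst_none, cellOf_snd_none]

lemma bnxt_range (A : List Int) (B : Int) (p : Nat) (hn : 2 ≤ A.length)
    (hp : p ≤ A.length - 2) (q : Int) (hq : bnxt A B p = some q) :
    (p : Int) < q ∧ q ≤ (A.length : Int) - 1 := by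
  by_cases hA : A.getD p 0 = -1
  · rw [(bcell_blocked A B p hn hp hA).2] at hq
    exact absurd hq (by simp)
  · have h := bcell_eq A B p hn hp hA
    have h2 : bnxt A B p = (cellOf ((PB A B p).foldl stepB none)).2 := congrArg Prod.snd h
    rw [h2] at hq
    cases hX : (PB A B p).foldl stepB none with
    | none => rw [hX] at hq; simp [cellOf] at hq
    | some a =>
      obtain ⟨v, t⟩ := a
      rw [hX] at hq
      simp only [cellOf, Option.some.injEq] at hq
      subst hq
      rcases stepB_mem (PB A B p) none v t hX with hmem | habs
      · obtain ⟨a, ha, hfa⟩ := List.mem_filterMap.mp hmem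
        have haM := List.mem_range.mp ha
        cases hbc : bcost A B (p + a + 1) with
        | none => rw [hbc] at hfa; simp at hfa
        | some c =>
          rw [hbc] at hfa
          simp only [Option.map_some, Option.some.injEq, Prod.mk.injEq] at hfa
          obtain ⟨hv, ht⟩ := hfa
          have hlt : (a : Int) < min B ((A.length : Int) - 1 - (p : Int)) := by omega
          rw [← ht]
          constructor
          · push_cast; omega
          · push_cast
            rcases le_total B ((A.length : Int) - 1 - (p : Int)) with hbj | hbj
            · have := min_eq_left hbj; omega
            · have := min_eq_right hbj; omega
      · simp at habs

-- ===== the bridge =====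

lemma getD_reverse (A : List Int) (s : Nat) (hs : s < A.length) :
    A.reverse.getD s 0 = A.getD (A.length - 1 - s) 0 := by
  rw [List.getD_eq_getElem?_getD, List.getD_eq_getElem?_getD, List.getElem?_reverse hs]

lemma bridge (A : List Int) (B : Int) (hn : 2 ≤ A.length) : ∀ (j : Nat), 1 ≤ j → j < A.length →
    pcell A.reverse B j j =
      (bcost A B (A.length - 1 - j),
       (bnxt A B (A.length - 1 - j)).map (fun x => (A.length : Int) - 1 - x)) := by
  intro j
  induction j using Nat.strong_induction_on with
  | _ j IH =>
    intro hj hjn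
    have hp2 : A.length - 1 - j ≤ A.length - 2 := by omega
    have hArj : A.reverse.getD j 0 = A.getD (A.length - 1 - j) 0 := getD_reverse A j hjn
    by_cases hA : A.getD (A.length - 1 - j) 0 = -1
    · rw [pcell_blocked A.reverse B j hj (by rw [hArj]; exact hA) j]
      obtain ⟨h1, h2⟩ := bcell_blocked A B (A.length - 1 - j) hn hp2 hA
      rw [h1, h2]
      rfl
    · have hfold := (pcell_fold A.reverse B j hj (by rw [hArj]; exact hA) j).1
      have heq := bcell_eq A B (A.length - 1 - j) hn hp2 hA
      have hMle : (min B (j : Int)).toNat ≤ j := by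
        rcases le_total B (j : Int) with hbj | hbj
        · have := min_eq_left hbj; omega
        · have := min_eq_right hbj; omega
      have hflip : ((A.length : Int) - 1 - ((A.length - 1 - j : Nat) : Int)) = (j : Int) := by
        push_cast; omega
      -- the key list identity
      have hPBeq : PB A B (A.length - 1 - j) =
          ((PA A.reverse B j j).reverse).map
            (Prod.map id (fun x => (A.length : Int) - 1 - x)) := by
        have hRHS : ((PA A.reverse B j j).reverse).map
              (Prod.map id (fun x => (A.length : Int) - 1 - x)) =
            (List.range j).filterMap (fun t =>
              (if ((j : Int) - ((j - 1 - t : Nat) : Int) ≤ B ∧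
                  A.reverse.getD (j - 1 - t) 0 ≠ -1 ∧
                  ((pcell A.reverse B (j - 1 - t) (j - 1 - t)).2 ≠ none ∨ j - 1 - t = 0)) then
                some (((pcell A.reverse B (j - 1 - t) (j - 1 - t)).1).getD 0 +
                  A.reverse.getD j 0, ((j - 1 - t : Nat) : Int))
              else none).map (Prod.map id (fun x => (A.length : Int) - 1 - x))) := by
          unfold PA
          rw [min_self, filterMap_range_reverse, List.map_filterMap]
        rw [hRHS]
        rw [filterMap_range_shorten ((min B (j : Int)).toNat) j _ hMle (by
          intro t htM htj
          have hcast : ((j - 1 - t : Nat) : Int) = (j : Int) - 1 - (t : Int) := by omega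
          have hcond : ¬ ((j : Int) - ((j - 1 - t : Nat) : Int) ≤ B) := by
            rw [hcast]
            rcases le_total B (j : Int) with hbj | hbj
            · have := min_eq_left hbj; omega
            · have := min_eq_right hbj; omega
          rw [if_neg (fun hh => hcond hh.1)]
          rfl)]
        unfold PB
        rw [hflip]
        apply List.filterMap_congr
        intro t ht
        have htM := List.mem_range.mp ht
        have htj : t < j := by omega
        have hcast : ((j - 1 - t : Nat) : Int) = (j : Int) - 1 - (t : Int) := by omega
        have hqs : A.length - 1 - j + t + 1 = A.length - 1 - (j - 1 - t) := by omega
        have htB : (j : Int) - ((j - 1 - t : Nat) : Int) ≤ B := by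
          rw [hcast]
          rcases le_total B (j : Int) with hbj | hbj
          · have := min_eq_left hbj; omega
          · have := min_eq_right hbj; omega
        have hqn : A.length - 1 - j + t + 1 < A.length := by omega
        -- compare, by cases on the target cell's reachability
        rcases Nat.eq_zero_or_pos (j - 1 - t) with hs0 | hspos
        · -- source is the last element of A
          have hq' : A.length - 1 - j + t + 1 = A.length - 1 := by omega
          obtain ⟨hbl, _⟩ := bcost_last A B hn
          rw [hq', hs0, hbl, pcell_zero]
          have hAr0 : A.reverse.getD 0 0 = A.getD (A.length - 1) 0 := by
            have h := getD_reverse A 0 (by omega)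
            simpa using h
          have htB' : (j : Int) - ((0 : Nat) : Int) ≤ B := by
            have h := htB
            rw [hs0] at h
            exact h
          by_cases hlast : A.getD (A.length - 1) 0 = -1
          · rw [if_pos hlast, if_neg]
            · rfl
            · rintro ⟨_, hh2, _⟩
              exact hh2 (by rw [hAr0]; exact hlast)
          · have hcnd : (j : Int) - ((0 : Nat) : Int) ≤ B ∧ A.reverse.getD 0 0 ≠ -1 ∧
                (((some (A.reverse.getD 0 0), none) : Option Int × Option Int).2 ≠ none ∨
                  (0 : Nat) = 0) :=
              ⟨htB', by rw [hAr0]; exact hlast, Or.inr rfl⟩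
            rw [if_neg hlast, if_pos hcnd]
            simp only [Option.map_some, Option.some.injEq, Prod.mk.injEq, Prod.map, id,
              Option.getD_some]
            constructor
            · rw [hAr0, hArj]
              ring
            · omega
        · -- interior source: use the induction hypothesis
          have hIH := IH (j - 1 - t) (by omega) (by omega) (by omega)
          have hArs : A.reverse.getD (j - 1 - t) 0 = A.getD (A.length - 1 - (j - 1 - t)) 0 :=
            getD_reverse A (j - 1 - t) (by omega)
          have hq2 : A.length - 1 - (j - 1 - t) ≤ A.length - 2 := by omega
          by_cases hblk : A.getD (A.length - 1 - (j - 1 - t)) 0 = -1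
          · obtain ⟨hb1, _⟩ := bcell_blocked A B (A.length - 1 - (j - 1 - t)) hn hq2 hblk
            rw [hqs, hb1, if_neg]
            · rfl
            · rintro ⟨_, hh2, _⟩
              exact hh2 (by rw [hArs]; exact hblk)
          · have hbn := bcell_both_none A B (A.length - 1 - (j - 1 - t)) hn hq2
            cases hbc : bcost A B (A.length - 1 - (j - 1 - t)) with
            | none =>
              have hnx : bnxt A B (A.length - 1 - (j - 1 - t)) = none := hbn.mp hbc
              rw [hqs, hbc, if_neg]
              · rfl
              · rintro ⟨_, _, hh3⟩
                rcases hh3 with hh3 | hh3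
                · rw [hIH, hnx] at hh3
                  exact hh3 rfl
                · omega
            | some c =>
              have hnx : bnxt A B (A.length - 1 - (j - 1 - t)) ≠ none := by
                intro hcn
                rw [hbn.mpr hcn] at hbc
                cases hbc
              obtain ⟨qq, hqq⟩ := Option.ne_none_iff_exists'.mp hnx
              rw [hqs, hbc, if_pos ⟨htB, by rw [hArs]; exact hblk,
                Or.inl (by rw [hIH, hqq]; simp)⟩]
              simp only [Option.map_some, Option.some.injEq, Prod.mk.injEq, Prod.map, id]
              constructor
              · rw [hIH]
                simp only [hbc, Option.getD_some]
                rw [hArj]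
                ring
              · omega
      -- assemble
      have hY : ((PB A B (A.length - 1 - j)).foldl stepB none) =
          (((PA A.reverse B j j).foldl stepA none).map
            (Prod.map id (fun x => (A.length : Int) - 1 - x))) := by
        rw [hPBeq]
        have hmt := stepB_map_tag (fun x => (A.length : Int) - 1 - x)
          ((PA A.reverse B j j).reverse) none
        simp only [Option.map_none] at hmt
        rw [hmt, ← stepA_reverse]
      have h1 : bcost A B (A.length - 1 - j) =
          (cellOf ((PB A B (A.length - 1 - j)).foldl stepB none)).1 := congrArg Prod.fst heq
      have h2 : bnxt A B (A.length - 1 - j) =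
          (cellOf ((PB A B (A.length - 1 - j)).foldl stepB none)).2 := congrArg Prod.snd heq
      rw [hfold, h1, h2, hY]
      cases hX : (PA A.reverse B j j).foldl stepA none with
      | none => rfl
      | some a =>
        obtain ⟨v, t⟩ := a
        have harr : (A.length : Int) - 1 - ((A.length : Int) - 1 - t) = t := by ring
        simp [cellOf, Prod.map, harr]

-- ===== reconstruction correspondence =====

lemma astate_conv (A : List Int) (B : Int) :
    astate A.reverse B A.length = astate A.reverse B A.reverse.length := by
  rw [List.length_reverse]

lemma build_corr (A : List Int) (B : Int) (hn : 2 ≤ A.length) :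
    ∀ (fuel : Nat) (p : Nat), p < A.length → A.length - p ≤ fuel → ∀ acc : List Int,
    aBuild (astate A.reverse B A.length) ((A.length : Int)) fuel
        ((A.length : Int) - 1 - (p : Int)) acc =
      altBuild (bstate A B (A.length - 1)).2 fuel (p : Int) acc := by
  have hrev : A.reverse.length = A.length := List.length_reverse
  obtain ⟨al, af⟩ := astate_spec A.reverse B A.reverse.length (le_refl _)
  intro fuel
  induction fuel with
  | zero => intro p hp hf acc; omega
  | succ fuel ih =>
    intro p hp hf acc
    have hcast : ((A.length : Int) - 1 - (p : Int)) = ((A.length - 1 - p : Nat) : Int) := by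
      omega
    have hai : PySem.List.pyGetD (astate A.reverse B A.length)
        ((A.length : Int) - 1 - (p : Int)) ((none, none)) =
        pcell A.reverse B (A.length - 1 - p) (A.length - 1 - p) := by
      rw [astate_conv, hcast, PySem.List.pyGetD_natCast, af (A.length - 1 - p) (by omega),
        pcell_stable A.reverse B (A.length - 1 - p) A.reverse.length (by omega)]
    have hbi : PySem.List.pyGetD (bstate A B (A.length - 1)).2 ((p : Nat) : Int) none =
        bnxt A B p := by
      rw [PySem.List.pyGetD_natCast]
      rfl
    have hval : (A.length : Int) - ((A.length : Int) - 1 - (p : Int)) = (p : Int) + 1 := by ring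
    simp only [aBuild, altBuild, hai, hbi, hval]
    by_cases hp1 : p = A.length - 1
    · have hj0 : A.length - 1 - p = 0 := by omega
      rw [hj0, pcell_zero]
      have hb0 : bnxt A B (A.length - 1) = none := (bcost_last A B hn).2
      rw [hp1, hb0]
    · have hj1 : 1 ≤ A.length - 1 - p := by omega
      have hbr := bridge A B hn (A.length - 1 - p) hj1 (by omega)
      have hpp : A.length - 1 - (A.length - 1 - p) = p := by omega
      rw [hpp] at hbr
      rw [hbr]
      cases hbq : bnxt A B p with
      | none => rfl
      | some q =>
        simp only [Option.map_some]
        obtain ⟨hq1, hq2⟩ := bnxt_range A B p hn (by omega) q hbq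
        have hq0 : (0 : Int) ≤ q := by omega
        have hqn : ((q.toNat : Nat) : Int) = q := Int.toNat_of_nonneg hq0
        have hidx : (A.length : Int) - 1 - q =
            (A.length : Int) - 1 - ((q.toNat : Nat) : Int) := by
          rw [hqn]
        rw [hidx, ← hqn]
        exact ih q.toNat (by omega) (by omega) (acc ++ [(p : Int) + 1])

-- ===== final assembly =====

lemma hdp_full (A : List Int) (B : Int) :
    (PySem.List.enumerate A.reverse 0).foldl (aBody A.reverse B)
      ((List.replicate A.reverse.length ((none, none) : Option Int × Option Int)).set 0
        (some (A.reverse.getD 0 0), none)) = astate A.reverse B A.length := by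
  rw [astate_conv]
  unfold astate ainit
  rw [List.take_of_length_le (le_of_eq (by simp [PySem.List.length_enumerate]))]

lemma hst_full (A : List Int) (B : Int) (hn : 2 ≤ A.length) :
    (PySem.List.pyRange ((A.length : Int) - 2) (-1) (-1)).foldl (bBody A B (A.length : Int))
      (binit A) = bstate A B (A.length - 1) := by
  unfold bstate
  rw [List.take_of_length_le]
  rw [brange A hn]
  simp

theorem cheapestJump_spec : Claim_equal_cheapestJump := by
  unfold Claim_equal_cheapestJump
  intro A B _ hpre
  unfold Spec_cheapestJump
  unfold Pre_cheapestJump at hpre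
  by_cases h1 : A.length = 1
  · unfold cheapestJump cheapestJump_alt
    simp [h1]
  · have hlen0 : 0 < A.length := List.length_pos_of_ne_nil hpre
    have hn : 2 ≤ A.length := by omega
    have hrev : A.reverse.length = A.length := List.length_reverse
    obtain ⟨al, af⟩ := astate_spec A.reverse B A.reverse.length (le_refl _)
    unfold cheapestJump cheapestJump_alt
    have hbeq : (A.length == 1) = false := by simpa using h1
    simp only [hbeq, Bool.false_eq_true, if_false]
    simp only [PySem.List.slice?_none_none_neg_one, Option.getD_some]
    rw [hdp_full A B]
    have hb : (PySem.List.pyRange ((A.length : Int) - 2) (-1) (-1)).foldl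
        (bBody A B (A.length : Int))
        (if PySem.List.pyGetD A ((A.length : Int) - 1) 0 == -1 then
          (List.replicate A.length (none : Option Int))
        else PySem.List.pySetD (List.replicate A.length none) ((A.length : Int) - 1)
          (some (PySem.List.pyGetD A ((A.length : Int) - 1) 0)),
        List.replicate A.length (none : Option Int)) = bstate A B (A.length - 1) :=
      hst_full A B hn
    rw [hb]
    simp only [hrev]
    -- the A-side last-cell read
    have hne : astate A.reverse B A.length ≠ [] := by
      rw [astate_conv]
      intro hcon
      rw [hcon] at al
      simp at al
      omega
    have hlast : PySem.List.pyGetD (astate A.reverse B A.length) (-1) ((none, none)) =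
        pcell A.reverse B (A.length - 1) (A.length - 1) := by
      rw [astate_conv]
      have hne' : astate A.reverse B A.reverse.length ≠ [] := by
        rw [← astate_conv]; exact hne
      rw [PySem.List.pyGetD_neg_one _ _ hne', List.getLast_eq_getElem]
      have hidx : A.length - 1 < (astate A.reverse B A.reverse.length).length := by
        rw [al, hrev]; omega
      have h2 : (astate A.reverse B A.reverse.length).getD (A.length - 1) ((none, none)) =
          pcell A.reverse B (A.length - 1) A.reverse.length :=
        af (A.length - 1) (by rw [hrev]; omega)
      rw [List.getD_eq_getElem?_getD, List.getElem?_eq_getElem hidx] at h2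
      simp only [Option.getD_some] at h2
      rw [pcell_stable A.reverse B (A.length - 1) A.reverse.length (by rw [hrev]; omega)] at h2
      convert h2 using 2
      rw [al, hrev]
    have hbr := bridge A B hn (A.length - 1) (by omega) (by omega)
    have h00 : A.length - 1 - (A.length - 1) = 0 := by omega
    rw [h00] at hbr
    have hb0 : PySem.List.pyGetD (bstate A B (A.length - 1)).1 0 none = bcost A B 0 := by
      rw [PySem.List.pyGetD_zero]
      rfl
    rw [hlast, hbr, hb0]
    cases hq : bnxt A B 0 with
    | none =>
      have hc0 : bcost A B 0 = none := (bcell_both_none A B 0 hn (by omega)).mpr hq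
      rw [hc0]
      simp
    | some q =>
      have hc0 : bcost A B 0 ≠ none := by
        intro h
        rw [(bcell_both_none A B 0 hn (by omega)).mp h] at hq
        cases hq
      obtain ⟨c, hc⟩ := Option.ne_none_iff_exists'.mp hc0
      rw [hc]
      rw [if_neg (by simp), if_neg (by simp)]
      have hstart : ((A.length : Int) - 1) = (A.length : Int) - 1 - ((0 : Nat) : Int) := by
        simp
      rw [hstart]
      have h0c : ((0 : Nat) : Int) = (0 : Int) := rfl
      rw [← h0c]
      exact build_corr A B hn A.length 0 (by omega) (by omega) []
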